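-- pv_equiv track=rewrite | github.com/villebro/pyhtzee | pyhtzee/scoring.py | score_one_pair
-- ===== SOURCE A (Python) =====
-- from collections import Counter
-- from typing import Dict, List, Set
--
-- def score_one_pair(dice: List[int]) -> int:
--     pairs: Set[int] = set()
--     for die, count in Counter(dice).most_common():
--         if count >= 2:
--             pairs.add(die)
--     if pairs:
--         sorted_pairs = sorted(pairs, reverse=True)
--         return sorted_pairs[0] * 2
--     return 0
-- ===== SOURCE B (Python) =====
-- def score_one_pair(dice):
--     s = sorted(dice, reverse=True)
--     for a, b in zip(s, s[1:]):
--         if a == b: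
--             return a * 2
--     return 0
-- ===== Notes on version B (the rewrite author's own statement) =====
-- stated objective: simpler
-- what changed: Replaces Counter-based frequency counting plus a set and a second sort by one descending sort followed by a single adjacent-equality scan that returns the first repeated value doubled.
import Mathlib
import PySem

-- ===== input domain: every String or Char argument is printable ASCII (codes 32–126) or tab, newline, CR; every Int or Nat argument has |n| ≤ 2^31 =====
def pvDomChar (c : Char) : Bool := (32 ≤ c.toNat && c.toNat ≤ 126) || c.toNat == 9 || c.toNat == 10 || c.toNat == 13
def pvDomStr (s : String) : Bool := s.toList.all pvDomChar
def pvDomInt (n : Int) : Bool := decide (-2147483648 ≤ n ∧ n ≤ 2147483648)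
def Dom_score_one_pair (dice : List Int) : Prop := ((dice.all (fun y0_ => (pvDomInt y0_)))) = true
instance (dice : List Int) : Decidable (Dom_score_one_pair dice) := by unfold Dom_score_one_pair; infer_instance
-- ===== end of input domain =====

-- B replaces Counter-based frequency counting by a descending sort with a single
-- adjacent-equality scan (simpler; equal on all inputs — A is total).

-- ===== PORT A =====
def score_one_pair (dice : List Int) : Int :=
  -- pairs: Set[int]; for die, count in Counter(dice).most_common(): if count >= 2: pairs.add(die)
  let pairs : PySem.Set Int :=
    (PySem.List.sorted (PySem.Dict.counter dice).items (fun p => p.2) true).foldl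
      (fun s p => if 2 ≤ p.2 then PySem.Set.add s p.1 else s) PySem.Set.empty
  if pairs ≠ [] then
    let sorted_pairs := PySem.List.sorted pairs (fun x => x) true
    PySem.List.pyGetD sorted_pairs 0 0 * 2
  else 0

-- ===== PORT B =====
-- the 'for a, b in zip(s, s[1:]): if a == b: return a*2' loop of Source B
def pvAdjScan : List (Int × Int) → Int
  | [] => 0
  | (a, b) :: rest => if a == b then a * 2 else pvAdjScan rest

def score_one_pair_alt (dice : List Int) : Int :=
  let s := PySem.List.sorted dice (fun x => x) true
  pvAdjScan (s.zip (PySem.List.slice s (some 1) none))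

-- ===== PRECONDITION & SPEC =====
def Spec_score_one_pair (dice : List Int) (out : Int) : Prop := out = score_one_pair_alt dice
instance (dice : List Int) (out : Int) : Decidable (Spec_score_one_pair dice out) := by unfold Spec_score_one_pair; infer_instance

-- ===== CLAIM (what is proved, stated in full; the proofs are below) =====
def Claim_equal_score_one_pair : Prop := ∀ (dice : List Int), Dom_score_one_pair dice → Spec_score_one_pair dice (score_one_pair dice)

-- ===== LEMMAS AND PROOFS =====

-- "r is the right answer for dice": either no value occurs twice and r = 0,
-- or r is twice the largest value occurring at least twice.
def GoodOut (dice : List Int) (r : Int) : Prop :=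
  ((∀ v, dice.count v < 2) ∧ r = 0) ∨
  (∃ m, 2 ≤ dice.count m ∧ (∀ v, 2 ≤ dice.count v → v ≤ m) ∧ r = 2 * m)

theorem goodOut_unique (dice : List Int) (r r' : Int)
    (h : GoodOut dice r) (h' : GoodOut dice r') : r = r' := by
  rcases h with ⟨hn, rfl⟩ | ⟨m, hm2, hmax, rfl⟩
  · rcases h' with ⟨_, rfl⟩ | ⟨m', hm2', _, rfl⟩
    · rfl
    · exact absurd hm2' (by have := hn m'; omega)
  · rcases h' with ⟨hn', rfl⟩ | ⟨m', hm2', hmax', rfl⟩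
    · exact absurd hm2 (by have := hn' m; omega)
    · have h1 := hmax m' hm2'
      have h2 := hmax' m hm2
      omega

-- membership in A's foldl-built set of paired dice
theorem mem_pairs_foldl (l : List (Int × Int)) (s0 : PySem.Set Int) (v : Int) :
    v ∈ l.foldl (fun s p => if 2 ≤ p.2 then PySem.Set.add s p.1 else s) s0 ↔
      v ∈ s0 ∨ ∃ p ∈ l, 2 ≤ p.2 ∧ p.1 = v := by
  induction l generalizing s0 with
  | nil => simp
  | cons p t ih =>
    simp only [List.foldl_cons, ih, List.mem_cons]
    by_cases h : 2 ≤ p.2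
    · simp only [h, if_pos, PySem.Set.mem_add]
      constructor
      · rintro ((hs | rfl) | ⟨q, hq, h2, rfl⟩)
        · exact Or.inl hs
        · exact Or.inr ⟨p, Or.inl rfl, h, rfl⟩
        · exact Or.inr ⟨q, Or.inr hq, h2, rfl⟩
      · rintro (hs | ⟨q, (rfl | hq), h2, rfl⟩)
        · exact Or.inl (Or.inl hs)
        · exact Or.inl (Or.inr rfl)
        · exact Or.inr ⟨q, hq, h2, rfl⟩
    · simp only [h, if_false]
      constructor
      · rintro (hs | ⟨q, hq, h2, rfl⟩)
        · exact Or.inl hs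
        · exact Or.inr ⟨q, Or.inr hq, h2, rfl⟩
      · rintro (hs | ⟨q, (rfl | hq), h2, rfl⟩)
        · exact Or.inl hs
        · exact absurd h2 h
        · exact Or.inr ⟨q, hq, h2, rfl⟩

-- v is in A's "pairs" set exactly when it occurs at least twice in dice
theorem mem_pairs_iff (dice : List Int) (v : Int) :
    v ∈ (PySem.List.sorted (PySem.Dict.counter dice).items (fun p => p.2) true).foldl
      (fun s p => if 2 ≤ p.2 then PySem.Set.add s p.1 else s) PySem.Set.empty ↔
      2 ≤ (dice.count v : Int) := by
  rw [mem_pairs_foldl]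
  simp only [PySem.Set.empty, List.not_mem_nil, false_or]
  constructor
  · rintro ⟨p, hp, h2, rfl⟩
    rw [PySem.List.mem_sorted, PySem.Dict.items_counter] at hp
    obtain ⟨k, hkmem, rfl⟩ := List.mem_map.mp hp
    simpa using h2
  · intro h2
    have hv : v ∈ dice := by
      rw [← List.count_pos_iff]; omega
    refine ⟨(v, (dice.count v : Int)), ?_, h2, rfl⟩
    rw [PySem.List.mem_sorted, PySem.Dict.items_counter]
    exact List.mem_map.mpr ⟨v, (PySem.Set.mem_ofList _ _).mpr hv, rfl⟩

theorem goodOut_A (dice : List Int) : GoodOut dice (score_one_pair dice) := by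
  unfold score_one_pair
  set pairs := (PySem.List.sorted (PySem.Dict.counter dice).items (fun p => p.2) true).foldl
      (fun s p => if 2 ≤ p.2 then PySem.Set.add s p.1 else s) PySem.Set.empty with hpairs
  by_cases hne : pairs = []
  · simp only [hne, ne_eq, not_true_eq_false, if_false]
    left
    refine ⟨fun v => ?_, rfl⟩
    by_contra hc
    have : v ∈ pairs := (mem_pairs_iff dice v).mpr (by omega)
    simp [hne] at this
  · simp only [ne_eq, hne, not_false_eq_true, if_true]
    have hsp : PySem.List.sorted pairs (fun x => x) true ≠ [] := by
      simp only [ne_eq, PySem.List.sorted_eq_nil_iff]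
      exact hne
    obtain ⟨m, t, hmt⟩ := List.exists_cons_of_ne_nil hsp
    have hub : ∀ y ∈ pairs, y ≤ m := fun y hy =>
      PySem.List.key_head_sorted_rev_ge _ _ hmt y hy
    have hm : m ∈ pairs := by
      rw [← PySem.List.mem_sorted pairs (fun x => x) true, hmt]
      exact List.mem_cons_self
    right
    refine ⟨m, ?_, ?_, ?_⟩
    · have := (mem_pairs_iff dice m).mp hm; omega
    · intro v hv
      exact hub v ((mem_pairs_iff dice v).mpr (by omega))
    · rw [hmt, PySem.List.pyGetD_zero_cons]; ring

-- the adjacency scan on a descending list is correct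
theorem goodOut_scan (s : List Int) (hpw : s.Pairwise (fun a b => b ≤ a)) :
    GoodOut s (pvAdjScan (s.zip s.tail)) := by
  induction s with
  | nil => left; exact ⟨fun v => by simp, rfl⟩
  | cons a s ih =>
    rw [List.pairwise_cons] at hpw
    obtain ⟨ha, hpw'⟩ := hpw
    cases s with
    | nil =>
      left
      refine ⟨fun v => ?_, rfl⟩
      have h := List.count_le_length (l := [a]) (a := v)
      simp at h
      omega
    | cons b t =>
      simp only [List.tail_cons, List.zip_cons_cons, pvAdjScan]
      by_cases hab : a = b
      · simp only [hab, beq_self_eq_true, if_true]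
        subst hab
        right
        refine ⟨a, ?_, ?_, by ring⟩
        · simp only [List.count_cons_self]
          omega
        · intro v hv
          have hvmem : v ∈ a :: a :: t := List.count_pos_iff.mp (by omega)
          rcases List.mem_cons.mp hvmem with rfl | hvm
          · exact le_refl _
          · exact ha v hvm
      · have hbeq : (a == b) = false := by simp [hab]
        simp only [hbeq]
        have hGoB := ih hpw'
        -- a occurs exactly once in a :: b :: t
        have hanotin : a ∉ b :: t := by
          intro hc
          have h1 : a ≤ b := by
            rcases List.mem_cons.mp hc with rfl | hm'
            · exact le_refl _
            · rw [List.pairwise_cons] at hpw'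
              exact le_trans (hpw'.1 a hm') (le_refl b)
          have h2 : b ≤ a := ha b List.mem_cons_self
          exact hab (le_antisymm h1 h2)
        have hcnt : ∀ v : Int, (a :: b :: t).count v =
            (b :: t).count v + if v = a then 1 else 0 := by
          intro v
          rw [List.count_cons]
          split <;> split <;> simp_all
        have hcnta : (b :: t).count a = 0 := List.count_eq_zero.mpr hanotin
        rcases hGoB with ⟨hn, hr⟩ | ⟨m, hm2, hmax, hr⟩
        · left
          refine ⟨fun v => ?_, hr⟩
          have := hn v
          rw [hcnt v]
          by_cases hva : v = a
          · subst hva; simp; omega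
          · simp [hva]; omega
        · right
          refine ⟨m, ?_, ?_, hr⟩
          · rw [hcnt m]
            by_cases hma : m = a
            · subst hma; omega
            · simp [hma]; omega
          · intro v hv
            rw [hcnt v] at hv
            by_cases hva : v = a
            · subst hva
              rw [if_pos rfl] at hv
              omega
            · simp [hva] at hv
              exact hmax v hv

theorem goodOut_B (dice : List Int) : GoodOut dice (score_one_pair_alt dice) := by
  simp only [score_one_pair_alt, PySem.List.slice_from_one]
  have hperm : (PySem.List.sorted dice (fun x => x) true).Perm dice :=
    PySem.List.sorted_perm dice (fun x => x) true
  have hG := goodOut_scan _ (PySem.List.sorted_pairwise_rev dice (fun x => x))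
  unfold GoodOut at hG ⊢
  simp only [hperm.count_eq] at hG
  exact hG

-- ===== VERDICT (by name: the statement is the Claim_ definition above) =====
theorem score_one_pair_spec : Claim_equal_score_one_pair := by
  intro dice _
  exact goodOut_unique dice _ _ (goodOut_A dice) (goodOut_B dice)
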